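-- pv_equiv track=rewrite | github.com/christineyan4/compling | hw1/anagrams.py | build_sorted_dicts
-- ===== SOURCE A (Python) =====
-- def build_sorted_dicts(grams):
--     nested_grams = {}
--
--     # building nested dicts, first by size, then by length
--     for key in grams:
--         size = len(grams[key])
--         length = len(key)
--         if size > 1:
--             if size in nested_grams:
--                 length_dict = nested_grams[size]
--                 if length in length_dict:
--                     grams_dict = length_dict[length]
--                     grams_dict[key] = grams[key]
--                 else:
--                     length_dict[length] = {key: grams[key]}
--             else:
--                 nested_grams[size] = {length: {key: grams[key]}}
--
--     # sorting nested_grams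
--     for size in nested_grams:
--         length_dict = nested_grams[size]
--         nested_grams[size] = dict(sorted(length_dict.items()))
--     sorted_grams = dict(sorted(nested_grams.items()))
--
--     return sorted_grams
-- ===== SOURCE B (Python) =====
-- def build_sorted_dicts(grams):
--     items = [(k, v) for k, v in grams.items() if len(v) > 1]
--     sizes = sorted({len(v) for _, v in items})
--     return {s: {l: {k: v for k, v in items if len(v) == s and len(k) == l}
--                 for l in sorted({len(k) for k, v in items if len(v) == s})}
--             for s in sizes}
-- ===== Notes on version B (the rewrite author's own statement) =====
-- stated objective: simpler
-- what changed: Replaces the incremental nested-dict-building loop with its four-way branch and the two trailing sort passes by a declarative nested comprehension: filter the big groups once, then map over the sorted set of sizes and, per size, the sorted set of key lengths, selecting each innermost group directly by filtering. Pre_ only excludes association lists with duplicate keys, which do not represent any Python dict input.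
import Mathlib
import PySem

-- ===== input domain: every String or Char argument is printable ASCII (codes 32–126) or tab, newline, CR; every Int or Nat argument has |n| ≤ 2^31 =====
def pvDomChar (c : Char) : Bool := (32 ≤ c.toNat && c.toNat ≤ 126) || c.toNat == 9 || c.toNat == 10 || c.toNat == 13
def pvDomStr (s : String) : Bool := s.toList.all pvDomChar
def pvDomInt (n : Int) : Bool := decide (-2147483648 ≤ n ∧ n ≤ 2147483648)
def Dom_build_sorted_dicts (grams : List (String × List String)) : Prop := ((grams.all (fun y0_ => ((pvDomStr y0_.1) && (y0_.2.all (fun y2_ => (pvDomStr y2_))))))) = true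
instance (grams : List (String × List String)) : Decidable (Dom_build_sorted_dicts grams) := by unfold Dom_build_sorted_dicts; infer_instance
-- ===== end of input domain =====

-- B replaces A's incremental nested-dict building plus two trailing sort passes by one declarative nested
-- comprehension over sorted key sets (objective: simpler; not faster).

-- ===== PORT A =====
-- loop body of A's first for-loop ('for key in grams: …')
def pvStep (nested : PySem.Dict Int (PySem.Dict Int (PySem.Dict String (List String))))
    (kv : String × List String) : PySem.Dict Int (PySem.Dict Int (PySem.Dict String (List String))) :=
  let size : Int := (kv.2.length : Int)
  let length : Int := PySem.Str.len kv.1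
  if 1 < size then
    if nested.contains size then
      let length_dict := nested.getD size PySem.Dict.empty
      if length_dict.contains length then
        let grams_dict := length_dict.getD length PySem.Dict.empty
        nested.insert size (length_dict.insert length (grams_dict.insert kv.1 kv.2))
      else
        nested.insert size (length_dict.insert length (PySem.Dict.ofList [(kv.1, kv.2)]))
    else
      nested.insert size (PySem.Dict.ofList [(length, PySem.Dict.ofList [(kv.1, kv.2)])])
  else nested

def build_sorted_dicts (grams : List (String × List String)) : List (Int × List (Int × List (String × List String))) :=
  let nested := grams.foldl pvStep PySem.Dict.empty
  -- 'for size in nested_grams: nested_grams[size] = dict(sorted(length_dict.items()))': every existing key is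
  -- reassigned in place (overwrite keeps position), i.e. the items list is mapped entry by entry; keys are
  -- distinct ints, so Python's tuple comparison inside sorted() never reaches the dict component: sorting the
  -- items by their key component is exact.
  let withSortedInner := nested.items.map (fun p => (p.1, PySem.List.sorted p.2.items (fun q => q.1)))
  -- 'sorted_grams = dict(sorted(nested_grams.items()))', rendered as its items list (keys are distinct)
  let outer := PySem.List.sorted withSortedInner (fun p => p.1)
  outer.map (fun p => (p.1, p.2.map (fun q => (q.1, q.2.items))))

-- ===== PORT B =====
def build_sorted_dicts_alt (grams : List (String × List String)) : List (Int × List (Int × List (String × List String))) :=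
  let items := grams.filter (fun kv => decide (1 < (kv.2.length : Int)))
  let sizes := PySem.List.sorted (PySem.Set.ofList (items.map (fun kv => (kv.2.length : Int)))) id
  sizes.map (fun s =>
    (s, (PySem.List.sorted (PySem.Set.ofList ((items.filter (fun kv => (kv.2.length : Int) == s)).map
            (fun kv => PySem.Str.len kv.1))) id).map (fun l =>
      (l, items.filter (fun kv => (kv.2.length : Int) == s && PySem.Str.len kv.1 == l)))))

-- ===== PRECONDITION & SPEC =====
-- Pre_ excludes only association lists with duplicate keys: they do not represent any Python dict
-- (A's parameter is a dict, whose keys are necessarily distinct), so nothing A accepts is excluded.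
def Pre_build_sorted_dicts (grams : List (String × List String)) : Prop := (grams.map Prod.fst).Nodup
instance (grams : List (String × List String)) : Decidable (Pre_build_sorted_dicts grams) := by unfold Pre_build_sorted_dicts; infer_instance
def pvWitness_build_sorted_dicts : (List (String × List String)) := [("ab", ["x", "y"]), ("c", ["u", "v", "w"])]

def Spec_build_sorted_dicts (grams : List (String × List String)) (out : List (Int × List (Int × List (String × List String)))) : Prop := out = build_sorted_dicts_alt grams
-- decidable equality for the deeply nested return type (instance search gives up at this nesting depth,
-- so the instance is assembled by hand from the standard List/Prod instances)
def pvDE3 : DecidableEq (List (String × List String)) := inferInstance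
def pvDE2 : DecidableEq (List (Int × List (String × List String))) := fun a b => @instDecidableEqList _ (fun x y => @instDecidableEqProd _ _ inferInstance pvDE3 x y) a b
def pvDE1 : DecidableEq (List (Int × List (Int × List (String × List String)))) := fun a b => @instDecidableEqList _ (fun x y => @instDecidableEqProd _ _ inferInstance pvDE2 x y) a b
instance (grams : List (String × List String)) (out : List (Int × List (Int × List (String × List String)))) : Decidable (Spec_build_sorted_dicts grams out) := by unfold Spec_build_sorted_dicts; exact pvDE1 out _

-- ===== CLAIM (what is proved, stated in full; the proofs are below) =====
def Claim_equal_build_sorted_dicts : Prop := ∀ (grams : List (String × List String)), Dom_build_sorted_dicts grams → Pre_build_sorted_dicts grams → Spec_build_sorted_dicts grams (build_sorted_dicts grams)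

-- ===== LEMMAS AND PROOFS =====

-- proof-side abbreviations for the two grouping keys and the innermost group
def pvSz (kv : String × List String) : Int := (kv.2.length : Int)
def pvLn (kv : String × List String) : Int := PySem.Str.len kv.1
def pvBig (kv : String × List String) : Bool := decide (1 < (kv.2.length : Int))
def pvG3 (f : List (String × List String)) (s l : Int) : List (String × List String) :=
  f.filter (fun kv => pvSz kv == s && pvLn kv == l)

-- invariant of A's building loop, relating the nested dict to the processed (filtered) prefix f
def pvInv (d : PySem.Dict Int (PySem.Dict Int (PySem.Dict String (List String))))
    (f : List (String × List String)) : Prop :=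
  d.keys = PySem.Set.ofList (f.map pvSz) ∧
  ∀ s ∈ d.keys,
    (d.getD s PySem.Dict.empty).keys
        = PySem.Set.ofList ((f.filter (fun kv => pvSz kv == s)).map pvLn) ∧
    ∀ l ∈ (d.getD s PySem.Dict.empty).keys,
      ((d.getD s PySem.Dict.empty).getD l PySem.Dict.empty).items = pvG3 f s l

lemma pvOfList_concat {α : Type} [BEq α] [LawfulBEq α] (L : List α) (a : α) :
    PySem.Set.ofList (L ++ [a])
      = if a ∈ PySem.Set.ofList L then PySem.Set.ofList L else PySem.Set.ofList L ++ [a] := by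
  show List.foldl PySem.Set.add PySem.Set.empty (L ++ [a]) = _
  rw [List.foldl_append]
  show PySem.Set.add _ a = _
  simp only [PySem.Set.add, PySem.Set.contains_iff]
  rw [show List.foldl PySem.Set.add PySem.Set.empty L = PySem.Set.ofList L from rfl]

lemma pvFilter_nil_of_not_mem (f : List (String × List String)) (s : Int)
    (h : s ∉ PySem.Set.ofList (f.map pvSz)) :
    f.filter (fun kv => pvSz kv == s) = [] := by
  rw [List.filter_eq_nil_iff]
  intro kv hkv
  simp only [PySem.Set.mem_ofList, List.mem_map] at h
  simp only [beq_iff_eq]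
  exact fun he => h ⟨kv, hkv, he⟩

lemma pvG3_nil_of_not_mem (f : List (String × List String)) (s l : Int)
    (h : l ∉ PySem.Set.ofList ((f.filter (fun kv => pvSz kv == s)).map pvLn)) :
    pvG3 f s l = [] := by
  unfold pvG3
  rw [List.filter_eq_nil_iff]
  intro kv hkv
  simp only [PySem.Set.mem_ofList, List.mem_map, List.mem_filter] at h
  simp only [Bool.and_eq_true, beq_iff_eq, not_and]
  exact fun hs hl => h ⟨kv, ⟨hkv, by simp [hs]⟩, hl⟩

-- pvStep with its let-bindings expanded (definitional)
lemma pvStep_def (d : PySem.Dict Int (PySem.Dict Int (PySem.Dict String (List String))))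
    (x : String × List String) :
    pvStep d x =
      if 1 < pvSz x then
        if d.contains (pvSz x) then
          if (d.getD (pvSz x) PySem.Dict.empty).contains (pvLn x) then
            d.insert (pvSz x) ((d.getD (pvSz x) PySem.Dict.empty).insert (pvLn x)
              (((d.getD (pvSz x) PySem.Dict.empty).getD (pvLn x) PySem.Dict.empty).insert x.1 x.2))
          else d.insert (pvSz x) ((d.getD (pvSz x) PySem.Dict.empty).insert (pvLn x)
              (PySem.Dict.ofList [(x.1, x.2)]))
        else d.insert (pvSz x) (PySem.Dict.ofList [(pvLn x, PySem.Dict.ofList [(x.1, x.2)])])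
      else d := rfl

lemma pvSingleton_keys {κ ν : Type} [BEq κ] (a : κ) (b : ν) :
    (PySem.Dict.ofList [(a, b)]).keys = [a] := by
  rw [show (PySem.Dict.ofList [(a, b)]) = PySem.Dict.empty.insert a b from rfl,
    PySem.Dict.keys_insert_of_not_contains _ _ (PySem.Dict.contains_empty a), PySem.Dict.keys_empty]
  rfl

lemma pvSingleton_getD {κ ν : Type} [BEq κ] [LawfulBEq κ] [DecidableEq κ] (a : κ) (b d0 : ν) :
    (PySem.Dict.ofList [(a, b)]).getD a d0 = b := by
  rw [show (PySem.Dict.ofList [(a, b)]) = PySem.Dict.empty.insert a b from rfl,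
    PySem.Dict.getD_insert]
  simp

lemma pvSingleton_items {κ ν : Type} [BEq κ] (a : κ) (b : ν) :
    (PySem.Dict.ofList [(a, b)]).items = [(a, b)] := by
  rw [show (PySem.Dict.ofList [(a, b)]) = PySem.Dict.empty.insert a b from rfl,
    PySem.Dict.items_insert_of_not_contains _ _ (PySem.Dict.contains_empty a)]
  rfl

lemma pvFilter_concat (f : List (String × List String)) (x : String × List String) (s : Int) :
    (f ++ [x]).filter (fun kv => pvSz kv == s)
      = f.filter (fun kv => pvSz kv == s) ++ if pvSz x == s then [x] else [] := by
  cases hbe : pvSz x == s <;> simp [List.filter_append, hbe]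

lemma pvG3_concat (f : List (String × List String)) (x : String × List String) (s l : Int) :
    pvG3 (f ++ [x]) s l
      = pvG3 f s l ++ if pvSz x == s && pvLn x == l then [x] else [] := by
  cases h1 : pvSz x == s <;> cases h2 : pvLn x == l <;>
    simp [pvG3, List.filter_append, h1, h2]

lemma pvG3_nil_of_filter_nil (f : List (String × List String)) (s l : Int)
    (h : f.filter (fun kv => pvSz kv == s) = []) : pvG3 f s l = [] := by
  have h0 := List.filter_eq_nil_iff.mp h
  unfold pvG3
  rw [List.filter_eq_nil_iff]
  intro kv hkv
  simp only [Bool.and_eq_true, not_and]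
  exact fun h1 _ => h0 kv hkv h1

-- the building loop preserves the invariant when one entry with a fresh key is appended
lemma pvStep_inv (d : PySem.Dict Int (PySem.Dict Int (PySem.Dict String (List String))))
    (f : List (String × List String)) (x : String × List String)
    (hinv : pvInv d f) (hfresh : x.1 ∉ f.map Prod.fst) :
    pvInv (pvStep d x) (f ++ if pvBig x then [x] else []) := by
  obtain ⟨hk, hin⟩ := hinv
  by_cases hb : pvBig x = true
  · have hb1 : (1 : Int) < pvSz x := by simpa [pvBig, pvSz] using hb
    rw [pvStep_def, if_pos hb1]
    simp only [hb, if_true]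
    by_cases hs : pvSz x ∈ PySem.Set.ofList (f.map pvSz)
    · -- size already present
      have hcs : d.contains (pvSz x) = true := by
        rw [PySem.Dict.contains_eq_decide_mem_keys, hk]; exact decide_eq_true hs
      rw [if_pos hcs]
      obtain ⟨hkL, hinL⟩ := hin (pvSz x) (by rw [hk]; exact hs)
      by_cases hl : pvLn x ∈ PySem.Set.ofList
          ((f.filter (fun kv => pvSz kv == pvSz x)).map pvLn)
      · -- length already present
        have hcl : (d.getD (pvSz x) PySem.Dict.empty).contains (pvLn x) = true := by
          rw [PySem.Dict.contains_eq_decide_mem_keys, hkL]; exact decide_eq_true hl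
        rw [if_pos hcl]
        constructor
        · rw [PySem.Dict.keys_insert_of_contains _ _ hcs, hk, List.map_append]
          simp only [List.map_cons, List.map_nil]
          rw [pvOfList_concat, if_pos hs]
        · intro s' hs'
          rw [PySem.Dict.keys_insert_of_contains _ _ hcs] at hs'
          by_cases he : s' = pvSz x
          · subst he
            rw [PySem.Dict.getD_insert, if_pos rfl]
            constructor
            · rw [PySem.Dict.keys_insert_of_contains _ _ hcl, hkL, pvFilter_concat,
                List.map_append]
              simp only [beq_self_eq_true, if_true, List.map_cons, List.map_nil]
              rw [pvOfList_concat, if_pos hl]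
            · intro l' hl'
              rw [PySem.Dict.keys_insert_of_contains _ _ hcl] at hl'
              rw [PySem.Dict.getD_insert]
              by_cases hel : l' = pvLn x
              · subst hel
                rw [if_pos rfl]
                have hgd := hinL _ hl'
                have hcx : (((d.getD (pvSz x) PySem.Dict.empty).getD (pvLn x)
                    PySem.Dict.empty).insert x.1 x.2).items
                    = ((d.getD (pvSz x) PySem.Dict.empty).getD (pvLn x)
                    PySem.Dict.empty).items ++ [(x.1, x.2)] := by
                  apply PySem.Dict.items_insert_of_not_contains
                  rw [PySem.Dict.contains_eq_decide_mem_keys]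
                  apply decide_eq_false
                  intro hmem
                  have hmem2 : x.1 ∈ (pvG3 f (pvSz x) (pvLn x)).map Prod.fst := by
                    simpa [PySem.Dict.keys, hgd] using hmem
                  obtain ⟨kv, hkv, hfst⟩ := List.mem_map.mp hmem2
                  exact hfresh (List.mem_map.mpr ⟨kv, (List.mem_filter.mp hkv).1, hfst⟩)
                rw [hcx, hgd, pvG3_concat]
                simp
              · rw [if_neg hel, hinL l' hl', pvG3_concat]
                have hne : (pvLn x == l') = false := by
                  simp only [beq_eq_false_iff_ne, ne_eq]
                  exact fun hh => hel hh.symm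
                simp [hne]
          · -- size untouched by this entry
            rw [PySem.Dict.getD_insert, if_neg he]
            have hne : (pvSz x == s') = false := by
              simp only [beq_eq_false_iff_ne, ne_eq]
              exact fun hh => he hh.symm
            obtain ⟨h1, h2⟩ := hin s' hs'
            constructor
            · rw [h1, pvFilter_concat, hne]
              simp
            · intro l' hl'
              rw [h2 l' hl', pvG3_concat, hne]
              simp
      · -- fresh length under an existing size
        have hcl : (d.getD (pvSz x) PySem.Dict.empty).contains (pvLn x) = false := by
          rw [PySem.Dict.contains_eq_decide_mem_keys, hkL]; exact decide_eq_false hl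
        rw [hcl]
        simp only [Bool.false_eq_true, if_false]
        constructor
        · rw [PySem.Dict.keys_insert_of_contains _ _ hcs, hk, List.map_append]
          simp only [List.map_cons, List.map_nil]
          rw [pvOfList_concat, if_pos hs]
        · intro s' hs'
          rw [PySem.Dict.keys_insert_of_contains _ _ hcs] at hs'
          by_cases he : s' = pvSz x
          · subst he
            rw [PySem.Dict.getD_insert, if_pos rfl]
            constructor
            · rw [PySem.Dict.keys_insert_of_not_contains _ _ hcl, hkL, pvFilter_concat,
                List.map_append]
              simp only [beq_self_eq_true, if_true, List.map_cons, List.map_nil]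
              rw [pvOfList_concat, if_neg hl]
            · intro l' hl'
              rw [PySem.Dict.keys_insert_of_not_contains _ _ hcl] at hl'
              rw [PySem.Dict.getD_insert]
              rcases List.mem_append.mp hl' with hl0 | hl1
              · have hel : l' ≠ pvLn x := by
                  rintro rfl; exact hl (by rwa [hkL] at hl0)
                rw [if_neg hel, hinL l' hl0, pvG3_concat]
                have hne : (pvLn x == l') = false := by
                  simp only [beq_eq_false_iff_ne, ne_eq]
                  exact fun hh => hel hh.symm
                simp [hne]
              · have hel : l' = pvLn x := by simpa using hl1
                subst hel
                rw [if_pos rfl, pvSingleton_items, pvG3_concat,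
                  pvG3_nil_of_not_mem f _ _ hl]
                simp
          · rw [PySem.Dict.getD_insert, if_neg he]
            have hne : (pvSz x == s') = false := by
              simp only [beq_eq_false_iff_ne, ne_eq]
              exact fun hh => he hh.symm
            obtain ⟨h1, h2⟩ := hin s' hs'
            constructor
            · rw [h1, pvFilter_concat, hne]
              simp
            · intro l' hl'
              rw [h2 l' hl', pvG3_concat, hne]
              simp
    · -- fresh size
      have hcs : d.contains (pvSz x) = false := by
        rw [PySem.Dict.contains_eq_decide_mem_keys, hk]; exact decide_eq_false hs
      rw [hcs]
      simp only [Bool.false_eq_true, if_false]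
      have hfe : f.filter (fun kv => pvSz kv == pvSz x) = [] :=
        pvFilter_nil_of_not_mem f _ hs
      constructor
      · rw [PySem.Dict.keys_insert_of_not_contains _ _ hcs, hk, List.map_append]
        simp only [List.map_cons, List.map_nil]
        rw [pvOfList_concat, if_neg hs]
      · intro s' hs'
        rw [PySem.Dict.keys_insert_of_not_contains _ _ hcs] at hs'
        rcases List.mem_append.mp hs' with hs0 | hs1
        · have he : s' ≠ pvSz x := by
            rintro rfl; exact hs (by rwa [hk] at hs0)
          rw [PySem.Dict.getD_insert, if_neg he]
          have hne : (pvSz x == s') = false := by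
            simp only [beq_eq_false_iff_ne, ne_eq]
            exact fun hh => he hh.symm
          obtain ⟨h1, h2⟩ := hin s' hs0
          constructor
          · rw [h1, pvFilter_concat, hne]
            simp
          · intro l' hl'
            rw [h2 l' hl', pvG3_concat, hne]
            simp
        · have he : s' = pvSz x := by simpa using hs1
          subst he
          rw [PySem.Dict.getD_insert, if_pos rfl]
          constructor
          · rw [pvSingleton_keys, pvFilter_concat, hfe]
            simp [PySem.Set.ofList, PySem.Set.add, PySem.Set.empty]
          · intro l' hl'
            rw [pvSingleton_keys] at hl'
            have hel : l' = pvLn x := by simpa using hl'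
            subst hel
            rw [pvSingleton_getD, pvSingleton_items, pvG3_concat,
              pvG3_nil_of_filter_nil f _ _ hfe]
            simp
  · -- small group: the entry is skipped on both sides
    have hbf : pvBig x = false := by simpa using hb
    have hb' : ¬ (1 : Int) < pvSz x := by
      simpa [pvBig, pvSz] using hb
    rw [pvStep_def, if_neg hb']
    simp only [hbf, Bool.false_eq_true, if_false, List.append_nil]
    exact ⟨hk, hin⟩

lemma pvInv_foldl (xs : List (String × List String)) (h : (xs.map Prod.fst).Nodup) :
    pvInv (xs.foldl pvStep PySem.Dict.empty) (xs.filter pvBig) := by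
  induction xs using List.reverseRecOn with
  | nil =>
    refine ⟨?_, ?_⟩
    · rw [show (List.foldl pvStep PySem.Dict.empty []).keys = ([] : List Int)
        from PySem.Dict.keys_empty]
      rfl
    · intro s hs
      rw [show (List.foldl pvStep PySem.Dict.empty []).keys = ([] : List Int)
        from PySem.Dict.keys_empty] at hs
      cases hs
  | append_singleton xs x ih =>
    rw [List.map_append] at h
    have h2 : (xs.map Prod.fst).Nodup := (List.sublist_append_left _ _).nodup h
    have hx : x.1 ∉ xs.map Prod.fst := by
      intro hm
      rw [List.nodup_append] at h
      exact h.2.2 x.1 hm x.1 (by simp) rfl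
    have hfx : x.1 ∉ (xs.filter pvBig).map Prod.fst := fun hm => hx (by
      obtain ⟨kv, hkv, hf⟩ := List.mem_map.mp hm
      exact List.mem_map.mpr ⟨kv, (List.mem_filter.mp hkv).1, hf⟩)
    rw [List.foldl_append, List.filter_append]
    simp only [List.foldl_cons, List.foldl_nil]
    have hres := pvStep_inv _ _ x (ih h2) hfx
    rwa [show List.filter pvBig [x] = if pvBig x then [x] else [] by
      simp [List.filter_cons]] 

lemma pvSortPairs {β : Type} (L : List Int) (hL : L.Nodup) (g : Int → β) :
    PySem.List.sorted (L.map (fun k => (k, g k))) (fun p => p.1)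
      = (PySem.List.sorted L id).map (fun k => (k, g k)) := by
  apply PySem.List.sorted_eq_of_perm_of_pairwise_lt
  · exact (PySem.List.sorted_perm L id false).map _
  · rw [List.pairwise_map]
    have hnd : (PySem.List.sorted L id).Nodup := ((PySem.List.sorted_perm L id false).nodup_iff).mpr hL
    have hle := PySem.List.sorted_pairwise L id
    exact (hle.and hnd).imp (fun hab => lt_of_le_of_ne hab.1 hab.2)

-- ===== VERDICT (by name: the statement is the Claim_ definition above) =====
theorem build_sorted_dicts_spec : Claim_equal_build_sorted_dicts := by
  intro grams _hdom hpre
  show build_sorted_dicts grams = build_sorted_dicts_alt grams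
  obtain ⟨hk, hin⟩ := pvInv_foldl grams hpre
  have hndS : (PySem.Set.ofList ((grams.filter pvBig).map pvSz)).Nodup :=
    PySem.Set.nodup_ofList _
  have hndk : (grams.foldl pvStep PySem.Dict.empty).keys.Nodup := by
    rw [hk]; exact hndS
  have hA : build_sorted_dicts grams
      = (PySem.List.sorted ((grams.foldl pvStep PySem.Dict.empty).items.map
          (fun p => (p.1, PySem.List.sorted p.2.items (fun q => q.1)))) (fun p => p.1)).map
          (fun p => (p.1, p.2.map (fun q => (q.1, q.2.items)))) := rfl
  have hB : build_sorted_dicts_alt grams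
      = (PySem.List.sorted (PySem.Set.ofList ((grams.filter pvBig).map pvSz)) id).map
          (fun s => (s,
            (PySem.List.sorted (PySem.Set.ofList
              (((grams.filter pvBig).filter (fun kv => pvSz kv == s)).map pvLn)) id).map
              (fun l => (l, pvG3 (grams.filter pvBig) s l)))) := rfl
  rw [hA, hB]
  rw [PySem.Dict.items_eq_map_keys _ hndk PySem.Dict.empty, hk, List.map_map]
  simp only [Function.comp_def]
  rw [pvSortPairs _ hndS
    (fun s => PySem.List.sorted ((grams.foldl pvStep PySem.Dict.empty).getD s
      PySem.Dict.empty).items (fun q => q.1)), List.map_map]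
  simp only [Function.comp_def]
  apply List.map_congr_left
  intro s hs1
  have hsS : s ∈ PySem.Set.ofList ((grams.filter pvBig).map pvSz) :=
    ((PySem.List.sorted_perm _ id false).mem_iff).mp hs1
  obtain ⟨hkL, hinL⟩ := hin s (by rw [hk]; exact hsS)
  have hndL : ((grams.foldl pvStep PySem.Dict.empty).getD s PySem.Dict.empty).keys.Nodup := by
    rw [hkL]; exact PySem.Set.nodup_ofList _
  congr 1
  rw [PySem.Dict.items_eq_map_keys _ hndL PySem.Dict.empty, hkL]
  rw [pvSortPairs _ (PySem.Set.nodup_ofList _)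
    (fun l => ((grams.foldl pvStep PySem.Dict.empty).getD s PySem.Dict.empty).getD l
      PySem.Dict.empty), List.map_map]
  simp only [Function.comp_def]
  apply List.map_congr_left
  intro l hl1
  have hlL : l ∈ PySem.Set.ofList
      (((grams.filter pvBig).filter (fun kv => pvSz kv == s)).map pvLn) :=
    ((PySem.List.sorted_perm _ id false).mem_iff).mp hl1
  congr 1
  exact hinL l (by rw [hkL]; exact hlL)
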